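-- pv_equiv track=rewrite | github.com/dcceew-bdr/bdr-dq | dq/scoring_manager.py | calculate_subgroup_min_score
-- ===== SOURCE A (Python) =====
-- def calculate_subgroup_min_score(dictionary):
--     grouped_values = {}
--     for key, value in dictionary.items():
--         main_group, _ = key.split(':', 1)
--         if main_group in grouped_values:
--             grouped_values[main_group] = min(grouped_values[main_group], value)
--         else:
--             grouped_values[main_group] = value
--     return sum(grouped_values.values())
-- ===== SOURCE B (Python) =====
-- def calculate_subgroup_min_score(dictionary):
--     items = []
--     for key, value in dictionary.items():
--         main_group, _ = key.split(':', 1)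
--         items.append((main_group, value))
--     groups = []
--     for g, _ in items:
--         if g not in groups:
--             groups.append(g)
--     return sum(min(v for g2, v in items if g2 == g) for g in groups)
-- ===== Notes on version B (the rewrite author's own statement) =====
-- stated objective: alternative
-- what changed: B drops the dictionary entirely: it lists the distinct main groups in first-seen order, then for each group rescans the items and takes min of the matching values (nested scans, O(n*g)), instead of A's single pass maintaining a per-group running min in a dict.
import Mathlib
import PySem

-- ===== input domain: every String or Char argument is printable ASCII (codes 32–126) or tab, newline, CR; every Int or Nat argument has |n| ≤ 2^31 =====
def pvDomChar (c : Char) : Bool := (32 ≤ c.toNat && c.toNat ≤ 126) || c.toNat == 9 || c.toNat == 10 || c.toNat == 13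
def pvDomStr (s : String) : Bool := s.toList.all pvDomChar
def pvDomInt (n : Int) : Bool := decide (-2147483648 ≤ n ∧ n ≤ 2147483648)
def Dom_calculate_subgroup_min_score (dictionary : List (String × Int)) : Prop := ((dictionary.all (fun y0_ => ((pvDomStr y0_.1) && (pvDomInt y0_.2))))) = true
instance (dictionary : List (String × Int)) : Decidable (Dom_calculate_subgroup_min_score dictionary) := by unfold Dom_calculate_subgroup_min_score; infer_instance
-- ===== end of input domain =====

-- B lists the distinct main groups in first-seen order, then rescans the items per group
-- to take min of the matching values — no dict, nested scans instead of A's running-min pass.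


-- ===== PORT A =====
-- key.split(':', 1)[0]; under Pre_ every key contains ':' so the unpacking in A succeeds.
def pvMainGroup (s : String) : String :=
  ((PySem.Str.splitMax? s ":" 1).getD []).headD ""

def calculate_subgroup_min_score (dictionary : List (String × Int)) : Int :=
  let grouped := dictionary.foldl
    (fun (g : PySem.Dict String Int) kv =>
      let main_group := pvMainGroup kv.1
      if g.contains main_group then
        g.insert main_group (min (g.getD main_group 0) kv.2)
      else
        g.insert main_group kv.2)
    PySem.Dict.empty
  grouped.values.sum

-- ===== PORT B =====
-- B's 'groups' loop (append if 'not in') is exactly PySem.Set.ofList over the group list;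
-- Python's min raises on an empty generator, but each g comes from items so its filter is
-- nonempty and the '.getD 0' default is never reached.
def calculate_subgroup_min_score_alt (dictionary : List (String × Int)) : Int :=
  let items := dictionary.map (fun kv => (pvMainGroup kv.1, kv.2))
  let groups : PySem.Set String := PySem.Set.ofList (items.map (fun p => p.1))
  (groups.map (fun g =>
    (PySem.List.min? ((items.filter (fun p => p.1 == g)).map (fun p => p.2))
      (fun x => x)).getD 0)).sum

-- ===== PRECONDITION & SPEC =====
-- Pre_ excludes exactly the dictionaries with a key not containing ':' — there A's
-- 'main_group, _ = key.split(':', 1)' raises ValueError (one piece cannot unpack into two).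
def Pre_calculate_subgroup_min_score (dictionary : List (String × Int)) : Prop :=
  ∀ kv ∈ dictionary, ':' ∈ kv.1.toList
instance (dictionary : List (String × Int)) : Decidable (Pre_calculate_subgroup_min_score dictionary) := by unfold Pre_calculate_subgroup_min_score; infer_instance

def pvWitness_calculate_subgroup_min_score : (List (String × Int)) := [("a:x", 3), ("a:y", 1), ("b:z", 5)]

def Spec_calculate_subgroup_min_score (dictionary : List (String × Int)) (out : Int) : Prop := out = calculate_subgroup_min_score_alt dictionary
instance (dictionary : List (String × Int)) (out : Int) : Decidable (Spec_calculate_subgroup_min_score dictionary out) := by unfold Spec_calculate_subgroup_min_score; infer_instance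

-- ===== CLAIM (what is proved, stated in full; the proofs are below) =====
def Claim_equal_calculate_subgroup_min_score : Prop := ∀ (dictionary : List (String × Int)), Dom_calculate_subgroup_min_score dictionary → Pre_calculate_subgroup_min_score dictionary → Spec_calculate_subgroup_min_score dictionary (calculate_subgroup_min_score dictionary)

-- ===== LEMMAS AND PROOFS =====
-- A's loop body, over the (main-group, value) projection of the input
def pvStepA (g : PySem.Dict String Int) (p : String × Int) : PySem.Dict String Int :=
  if g.contains p.1 then g.insert p.1 (min (g.getD p.1 0) p.2) else g.insert p.1 p.2

-- optional running minimum
def pvOmin (o : Option Int) (v : Int) : Option Int :=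
  some (match o with | none => v | some a => min a v)

theorem pvStepA_get? (d : PySem.Dict String Int) (p : String × Int) (c : String) :
    (pvStepA d p).get? c = if p.1 == c then pvOmin (d.get? c) p.2 else d.get? c := by
  unfold pvStepA pvOmin
  by_cases h : p.1 = c
  · subst h
    by_cases hc : d.contains p.1
    · rw [PySem.Dict.contains_eq_isSome_get?] at hc
      cases hget : d.get? p.1 with
      | none => rw [hget] at hc; simp at hc
      | some a =>
        simp [PySem.Dict.get?_insert_self, PySem.Dict.getD_eq_get?_getD, hget,
          PySem.Dict.contains_eq_isSome_get?]
    · have hnone : d.get? p.1 = none := by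
        rw [PySem.Dict.contains_eq_isSome_get?] at hc
        cases hget : d.get? p.1 with
        | none => rfl
        | some a => rw [hget] at hc; simp at hc
      simp [hc, hnone, PySem.Dict.get?_insert_self]
  · have h' : c ≠ p.1 := fun hh => h hh.symm
    simp [h]
    split <;> simp [PySem.Dict.get?_insert_of_ne _ _ h']

theorem pvFoldA_get? (l : List (String × Int)) (d : PySem.Dict String Int) (c : String) :
    (l.foldl pvStepA d).get? c
      = ((l.filter (fun p => p.1 == c)).map (fun p => p.2)).foldl pvOmin (d.get? c) := by
  induction l generalizing d with
  | nil => rfl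
  | cons p l ih =>
    simp only [List.foldl_cons, List.filter_cons]
    rw [ih, pvStepA_get?]
    by_cases h : p.1 = c <;> simp [h]

theorem pvFoldl_omin_some (vs : List Int) (a : Int) :
    vs.foldl pvOmin (some a) = some (vs.foldl min a) := by
  induction vs generalizing a with
  | nil => rfl
  | cons v vs ih => simp [List.foldl_cons, pvOmin, ih]

theorem calculate_subgroup_min_score_spec : Claim_equal_calculate_subgroup_min_score := by
  intro dictionary _ _
  unfold Spec_calculate_subgroup_min_score
  unfold calculate_subgroup_min_score calculate_subgroup_min_score_alt
  simp only
  set l : List (String × Int) := dictionary.map (fun kv => (pvMainGroup kv.1, kv.2)) with hl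
  -- A's fold as a fold over the projected list l
  have hA : dictionary.foldl
      (fun (g : PySem.Dict String Int) kv =>
        let main_group := pvMainGroup kv.1
        if g.contains main_group then
          g.insert main_group (min (g.getD main_group 0) kv.2)
        else
          g.insert main_group kv.2)
      PySem.Dict.empty = l.foldl pvStepA PySem.Dict.empty := by
    rw [hl, List.foldl_map]; rfl
  rw [hA]
  set gA := l.foldl pvStepA PySem.Dict.empty with hgA
  -- A's keys are exactly B's groups list
  have hstep : pvStepA = (fun (g : PySem.Dict String Int) (p : String × Int) =>
      g.insert p.1 (if g.contains p.1 then min (g.getD p.1 0) p.2 else p.2)) := by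
    funext g p; unfold pvStepA; split <;> simp_all
  have hkA : gA.keys = PySem.Set.update ([] : List String) (l.map (fun p => p.1)) := by
    rw [hgA, hstep]
    have := PySem.Dict.keys_foldl_insert_key l (fun p => p.1)
      (fun (g : PySem.Dict String Int) p => if g.contains p.1 then min (g.getD p.1 0) p.2 else p.2)
      PySem.Dict.empty
    rwa [PySem.Dict.keys_empty] at this
  have hkeys : gA.keys = PySem.Set.ofList (l.map (fun p => p.1)) := by
    rw [hkA, PySem.Set.ofList_eq_foldl]; rfl
  have hndA : gA.keys.Nodup := by
    rw [hgA, hstep]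
    exact PySem.Dict.nodup_keys_foldl_insert_key l (fun p => p.1) _
      PySem.Dict.empty PySem.Dict.nodup_keys_empty
  rw [PySem.Dict.values_eq_map_keys gA hndA 0, hkeys]
  apply congrArg List.sum
  apply List.map_congr_left
  intro k hk
  have hget : gA.get? k = ((l.filter (fun p => p.1 == k)).map (fun p => p.2)).foldl pvOmin none := by
    rw [hgA, pvFoldA_get?, PySem.Dict.get?_empty]
  cases hfil : (l.filter (fun p => p.1 == k)).map (fun p => p.2) with
  | nil =>
    exfalso
    rw [← hkeys] at hk
    have : gA.get? k = none := by rw [hget, hfil]; rfl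
    exact (PySem.Dict.get?_eq_none_iff_not_mem_keys gA k).mp this hk
  | cons v vs =>
    have : gA.get? k = some (vs.foldl min v) := by
      rw [hget, hfil, List.foldl_cons]
      exact pvFoldl_omin_some vs v
    rw [PySem.Dict.getD_eq_get?_getD]
    rw [this]
    rw [PySem.List.min?_id_cons]
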